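-- pv_equiv track=rewrite | github.com/pbielak/aoc2022 | day02/main.py | find_move
-- ===== SOURCE A (Python) =====
-- def find_move(opponent_move: str, outcome: str) -> str:
--     winning_moves = {"Rock": "Paper", "Paper": "Scissors", "Scissors": "Rock"}
--
--     if outcome == "X":  # Need to lose
--         return {v: k for k, v in winning_moves.items()}[opponent_move]
--     elif outcome == "Y":  # Need to draw
--         return opponent_move
--     else:
--         assert outcome == "Z"  # Need to win
--         return winning_moves[opponent_move]
-- ===== SOURCE B (Python) =====
-- def find_move(opponent_move: str, outcome: str) -> str:
--     moves = ["Rock", "Paper", "Scissors"]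
--     idx = {m: i for i, m in enumerate(moves)}
--
--     if outcome == "Y":  # draw: mirror the opponent
--         return opponent_move
--     assert outcome in ("X", "Z")
--     offset = 2 if outcome == "X" else 1  # lose = previous in the cycle, win = next
--     return moves[(idx[opponent_move] + offset) % 3]
-- ===== Notes on version B (the rewrite author's own statement) =====
-- stated objective: idiomatic
-- what changed: Replaces the two hard-coded winning/losing dictionaries with a single ordered cycle ['Rock','Paper','Scissors'] plus an index map, computing the answer as modular arithmetic on the cycle position (offset 2 to lose, 1 to win).
import Mathlib
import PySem

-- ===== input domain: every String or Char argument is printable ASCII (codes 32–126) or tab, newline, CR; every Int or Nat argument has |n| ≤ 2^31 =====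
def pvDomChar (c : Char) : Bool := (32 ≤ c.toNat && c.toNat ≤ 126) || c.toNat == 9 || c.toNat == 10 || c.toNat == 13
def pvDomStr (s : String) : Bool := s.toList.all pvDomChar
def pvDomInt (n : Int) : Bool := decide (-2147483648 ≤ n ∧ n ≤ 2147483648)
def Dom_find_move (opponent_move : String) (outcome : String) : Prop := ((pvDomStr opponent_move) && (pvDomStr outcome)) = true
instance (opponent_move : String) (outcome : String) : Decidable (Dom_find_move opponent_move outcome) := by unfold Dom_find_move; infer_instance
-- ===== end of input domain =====

-- B replaces A's two hard-coded dictionaries by one ordered move cycle and modular index arithmetic (idiomatic, same cost).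


-- ===== PORT A =====
def find_move (opponent_move : String) (outcome : String) : String :=
  let winning_moves : PySem.Dict String String :=
    PySem.Dict.ofList [("Rock", "Paper"), ("Paper", "Scissors"), ("Scissors", "Rock")]
  if outcome == "X" then
    -- {v: k for k, v in winning_moves.items()}[opponent_move]; KeyError (none) excluded by Pre_
    (PySem.Dict.get?
      (winning_moves.items.foldl (fun d p => d.insert p.2 p.1) PySem.Dict.empty)
      opponent_move).getD ""
  else if outcome == "Y" then
    opponent_move
  else
    -- assert outcome == "Z" (AssertionError excluded by Pre_); KeyError (none) excluded by Pre_
    (PySem.Dict.get? winning_moves opponent_move).getD ""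

-- ===== PORT B =====
def find_move_alt (opponent_move : String) (outcome : String) : String :=
  let moves : List String := ["Rock", "Paper", "Scissors"]
  let idx : PySem.Dict String Int :=
    (PySem.List.enumerate moves 0).foldl (fun d p => d.insert p.2 p.1) PySem.Dict.empty
  if outcome == "Y" then
    opponent_move
  else
    -- assert outcome in ("X", "Z") (excluded by Pre_); KeyError on idx lookup excluded by Pre_
    let offset : Int := if outcome == "X" then 2 else 1
    (PySem.List.pyGet? moves
      (PySem.Int.mod ((PySem.Dict.get? idx opponent_move).getD 0 + offset) 3)).getD ""

-- ===== PRECONDITION & SPEC =====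
-- Pre_ excludes exactly the inputs where A raises: an outcome outside {X,Y,Z} (AssertionError),
-- or outcome X/Z with an opponent_move that is not a key of the dictionaries (KeyError).
def Pre_find_move (opponent_move : String) (outcome : String) : Prop :=
  outcome = "Y" ∨
  ((outcome = "X" ∨ outcome = "Z") ∧
   (opponent_move = "Rock" ∨ opponent_move = "Paper" ∨ opponent_move = "Scissors"))
instance (opponent_move : String) (outcome : String) : Decidable (Pre_find_move opponent_move outcome) := by
  unfold Pre_find_move; infer_instance

def pvWitness_find_move : String × String := ("Rock", "Z")

def Spec_find_move (opponent_move : String) (outcome : String) (out : String) : Prop := out = find_move_alt opponent_move outcome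
instance (opponent_move : String) (outcome : String) (out : String) : Decidable (Spec_find_move opponent_move outcome out) := by unfold Spec_find_move; infer_instance

-- ===== CLAIM (what is proved, stated in full; the proofs are below) =====
def Claim_equal_find_move : Prop := ∀ (opponent_move : String) (outcome : String), Dom_find_move opponent_move outcome → Pre_find_move opponent_move outcome → Spec_find_move opponent_move outcome (find_move opponent_move outcome)

-- ===== LEMMAS AND PROOFS =====

-- On a draw both programs echo the opponent's move.
theorem find_move_draw (om : String) : find_move om "Y" = om := by
  simp [find_move]

theorem find_move_alt_draw (om : String) : find_move_alt om "Y" = om := by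
  simp [find_move_alt]

-- ===== VERDICT (by name: the statement is the Claim_ definition above) =====
theorem find_move_spec : Claim_equal_find_move := by
  intro om oc _ hpre
  unfold Spec_find_move
  rcases hpre with hY | ⟨hXZ, hm⟩
  · subst hY; rw [find_move_draw, find_move_alt_draw]
  · rcases hXZ with h | h <;> subst h <;>
      rcases hm with h | h | h <;> subst h <;> decide
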